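-- pv_equiv track=rewrite | github.com/alienlien/algorithm | python/08/count.py | gen_sort_perm
-- ===== SOURCE A (Python) =====
-- def gen_cdf(in_list, max_val):
--     out = [0] * (max_val + 1)
--     for x in in_list:
--         out[x] += 1
--
--     for i in range(1, len(out)):
--         out[i] += out[i-1]
--     return out
--
-- def gen_sort_perm(in_list):
--     perm = [0] * len(in_list)
--     cdf = gen_cdf(in_list, max(in_list))
--     for i in range(len(in_list)-1, -1, -1):
--         val = in_list[i]
--         idx = cdf[val] - 1
--         perm[i] = idx
--         cdf[val] -= 1
--     return perm
-- ===== SOURCE B (Python) =====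
-- def gen_sort_perm(in_list):
--     # Stable rank: an element's sorted position is the number of strictly
--     # smaller elements plus the number of equal elements appearing before it.
--     return [sum(1 for x in in_list if x < v) + sum(1 for x in in_list[:i] if x == v)
--             for i, v in enumerate(in_list)]
-- ===== Notes on version B (the rewrite author's own statement) =====
-- stated objective: simpler
-- what changed: Replaces the counting-sort machinery (count array, prefix-sum pass, backward placement pass) with a direct per-element stable-rank formula: position = #strictly-smaller elements + #equal elements at earlier indices; Pre_ excludes the empty list (A's max() raises ValueError) and lists with negative elements, which lie outside counting sort's natural non-negative domain (A raises IndexError when some element is below -(max+1), and otherwise indexes the count array via Python negative-index wraparound).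
-- outside the precondition, e.g. on gen_sort_perm([-1, 0, 1]): A returns [1, 0, 2], B returns [0, 1, 2]
import Mathlib
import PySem

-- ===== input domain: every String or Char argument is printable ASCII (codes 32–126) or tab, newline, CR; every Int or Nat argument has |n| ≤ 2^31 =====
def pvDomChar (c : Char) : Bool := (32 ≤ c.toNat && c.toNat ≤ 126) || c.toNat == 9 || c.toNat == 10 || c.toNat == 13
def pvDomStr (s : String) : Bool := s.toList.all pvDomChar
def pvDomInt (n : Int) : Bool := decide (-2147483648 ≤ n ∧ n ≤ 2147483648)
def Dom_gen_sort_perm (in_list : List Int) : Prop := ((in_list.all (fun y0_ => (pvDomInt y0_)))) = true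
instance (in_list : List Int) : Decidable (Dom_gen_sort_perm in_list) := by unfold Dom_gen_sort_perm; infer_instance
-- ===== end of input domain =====

-- B computes each element's sorted position directly as (#strictly-smaller) + (#equal at earlier
-- indices), replacing A's counting-sort passes (count array, prefix sums, backward placement).


-- ===== PORT A =====
def gen_cdf (in_list : List Int) (max_val : Int) : List Int :=
  let out0 := List.replicate (max_val + 1).toNat (0 : Int)
  let out1 := in_list.foldl
    (fun out x => PySem.List.pySetD out x (PySem.List.pyGetD out x 0 + 1)) out0
  (PySem.List.pyRange 1 (out1.length : Int) 1).foldl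
    (fun out i =>
      PySem.List.pySetD out i (PySem.List.pyGetD out i 0 + PySem.List.pyGetD out (i - 1) 0)) out1

def gen_sort_perm (in_list : List Int) : List Int :=
  let perm0 := List.replicate in_list.length (0 : Int)
  let cdf0 := gen_cdf in_list ((PySem.List.max? in_list (fun y => y)).getD 0)
  ((PySem.List.pyRange ((in_list.length : Int) - 1) (-1) (-1)).foldl
    (fun (s : List Int × List Int) i =>
      let val := PySem.List.pyGetD in_list i 0
      let idx := PySem.List.pyGetD s.2 val 0 - 1
      (PySem.List.pySetD s.1 i idx,
       PySem.List.pySetD s.2 val (PySem.List.pyGetD s.2 val 0 - 1)))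
    (perm0, cdf0)).1

-- ===== PORT B =====
def gen_sort_perm_alt (in_list : List Int) : List Int :=
  (PySem.List.enumerate in_list 0).map (fun p =>
    ((in_list.countP (fun x => decide (x < p.2)) : Int))
      + ((PySem.List.slice in_list none (some p.1)).countP (fun x => decide (x = p.2)) : Int))

-- ===== PRECONDITION & SPEC =====
-- Pre_ excludes the empty list (A's max() raises ValueError) and lists with a negative element:
-- negatives are outside counting sort's natural non-negative domain (A raises IndexError when an
-- element is below -(max+1), and otherwise reads the count array through negative-index wraparound).
def Pre_gen_sort_perm (in_list : List Int) : Prop :=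
  in_list ≠ [] ∧ ∀ x ∈ in_list, 0 ≤ x
instance (in_list : List Int) : Decidable (Pre_gen_sort_perm in_list) := by
  unfold Pre_gen_sort_perm; infer_instance

def pvWitness_gen_sort_perm : List Int := [1, 3, 1, 0]

def Spec_gen_sort_perm (in_list : List Int) (out : List Int) : Prop :=
  out = gen_sort_perm_alt in_list
instance (in_list : List Int) (out : List Int) : Decidable (Spec_gen_sort_perm in_list out) := by
  unfold Spec_gen_sort_perm; infer_instance

-- ===== CLAIM (what is proved, stated in full; the proofs are below) =====
def Claim_equal_gen_sort_perm : Prop :=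
  ∀ (in_list : List Int), Dom_gen_sort_perm in_list → Pre_gen_sort_perm in_list →
    Spec_gen_sort_perm in_list (gen_sort_perm in_list)

-- ===== LEMMAS AND PROOFS =====

theorem pv_count_loop (a : List Int) (out : List Int)
    (h : ∀ x ∈ a, 0 ≤ x ∧ x.toNat < out.length) :
    (a.foldl (fun out x => PySem.List.pySetD out x (PySem.List.pyGetD out x 0 + 1)) out).length
      = out.length ∧
    ∀ j : Nat, j < out.length →
      PySem.List.pyGetD
        (a.foldl (fun out x => PySem.List.pySetD out x (PySem.List.pyGetD out x 0 + 1)) out)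
        (j : Int) 0
      = PySem.List.pyGetD out (j : Int) 0 + (a.count (j : Int) : Int) := by
  induction a generalizing out with
  | nil => simp
  | cons x t ih =>
    obtain ⟨hx0, hxlt⟩ := h x (by simp)
    have hxe : ((x.toNat : Nat) : Int) = x := Int.toNat_of_nonneg hx0
    have hlen' : (PySem.List.pySetD out x (PySem.List.pyGetD out x 0 + 1)).length = out.length := by
      rw [← hxe, PySem.List.pySetD_natCast]; simp
    have ht : ∀ y ∈ t, 0 ≤ y ∧ y.toNat <
        (PySem.List.pySetD out x (PySem.List.pyGetD out x 0 + 1)).length := by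
      intro y hy; rw [hlen']; exact h y (by simp [hy])
    obtain ⟨ihl, ihg⟩ := ih _ ht
    refine ⟨by simpa [hlen'] using ihl, ?_⟩
    intro j hj
    rw [List.foldl_cons, ihg j (by omega)]
    rw [← hxe, PySem.List.pyGetD_pySetD_natCast out x.toNat j _ 0 hxlt]
    by_cases hj' : j = x.toNat
    · subst hj'
      simp [hxe]
      ring
    · have h2 : x ≠ (j : Int) := by
        rw [← hxe]; exact fun e => hj' (by exact_mod_cast e.symm)
      rw [if_neg hj']
      simp [List.count_cons]
      omega

theorem pv_prefix_loop (c : List Int) (k : Nat) (hk : k ≤ c.length) :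
    ((PySem.List.pyRange 1 (k : Int) 1).foldl
      (fun out i =>
        PySem.List.pySetD out i
          (PySem.List.pyGetD out i 0 + PySem.List.pyGetD out (i - 1) 0)) c).length = c.length ∧
    (∀ j : Nat, j < k →
      PySem.List.pyGetD
        ((PySem.List.pyRange 1 (k : Int) 1).foldl
          (fun out i =>
            PySem.List.pySetD out i
              (PySem.List.pyGetD out i 0 + PySem.List.pyGetD out (i - 1) 0)) c) (j : Int) 0
        = ∑ w ∈ Finset.range (j + 1), PySem.List.pyGetD c (w : Int) 0) ∧
    (∀ j : Nat, k ≤ j → j < c.length →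
      PySem.List.pyGetD
        ((PySem.List.pyRange 1 (k : Int) 1).foldl
          (fun out i =>
            PySem.List.pySetD out i
              (PySem.List.pyGetD out i 0 + PySem.List.pyGetD out (i - 1) 0)) c) (j : Int) 0
        = PySem.List.pyGetD c (j : Int) 0) := by
  induction k with
  | zero =>
    rw [PySem.List.pyRange_one_eq_nil (by omega)]
    exact ⟨rfl, by omega, fun j _ _ => rfl⟩
  | succ k ih =>
    by_cases hk0 : k = 0
    · subst hk0
      rw [show (((0:Nat)+1 : Nat) : Int) = 1 by norm_num,
          PySem.List.pyRange_one_eq_nil (by omega)]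
      refine ⟨rfl, ?_, fun j _ _ => rfl⟩
      intro j hj
      interval_cases j
      simp [Finset.sum_range_one, PySem.List.pyGetD_zero, List.getD]
    · obtain ⟨ihl, ih1, ih2⟩ := ih (by omega)
      have hklen : k < c.length := by omega
      have hsplit : PySem.List.pyRange 1 ((k + 1 : Nat) : Int) 1
          = PySem.List.pyRange 1 (k : Int) 1 ++ [(k : Int)] := by
        push_cast
        exact PySem.List.pyRange_one_succ_right (by omega)
      rw [hsplit, List.foldl_append]
      set r := (PySem.List.pyRange 1 (k : Int) 1).foldl
          (fun out i =>
            PySem.List.pySetD out i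
              (PySem.List.pyGetD out i 0 + PySem.List.pyGetD out (i - 1) 0)) c with hr
      simp only [List.foldl_cons, List.foldl_nil]
      have hkr : k < r.length := by omega
      have hval : PySem.List.pyGetD r (k : Int) 0 + PySem.List.pyGetD r ((k : Int) - 1) 0
          = ∑ w ∈ Finset.range (k + 1), PySem.List.pyGetD c (w : Int) 0 := by
        have e1 : PySem.List.pyGetD r (k : Int) 0 = PySem.List.pyGetD c (k : Int) 0 :=
          ih2 k (le_refl k) hklen
        have e2 : ((k : Int) - 1) = ((k - 1 : Nat) : Int) := by omega
        have e3 : PySem.List.pyGetD r ((k : Int) - 1) 0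
            = ∑ w ∈ Finset.range (k - 1 + 1), PySem.List.pyGetD c (w : Int) 0 := by
          rw [e2]; exact ih1 (k - 1) (by omega)
        have e4 : k - 1 + 1 = k := by omega
        rw [e1, e3, e4, Finset.sum_range_succ]
        ring
      refine ⟨by simpa using ihl, ?_, ?_⟩
      · intro j hj
        rw [PySem.List.pyGetD_pySetD_natCast r k j _ 0 hkr]
        by_cases hjk : j = k
        · rw [if_pos hjk, hval, hjk]
        · rw [if_neg hjk]
          exact ih1 j (by omega)
      · intro j hj hjl
        rw [PySem.List.pyGetD_pySetD_natCast r k j _ 0 hkr]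
        rw [if_neg (by omega)]
        exact ih2 j (by omega) hjl

theorem pv_countP_succ (a : List Int) (v : Int) :
    a.countP (fun x => decide (x ≤ v + 1))
      = a.countP (fun x => decide (x ≤ v)) + a.count (v + 1) := by
  induction a with
  | nil => simp
  | cons x t ih =>
    simp only [List.countP_cons, List.count_cons, ih]
    by_cases h1 : x ≤ v
    · have h2 : x ≤ v + 1 := by omega
      have h3 : ¬ (x = v + 1) := by omega
      simp [h1, h2, h3]
      omega
    · by_cases h4 : x = v + 1
      · simp [h4]
        omega
      · have h5 : ¬ (x ≤ v + 1) := by omega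
        simp [h1, h4, h5]

theorem pv_countP_zero (a : List Int) (hpos : ∀ x ∈ a, 0 ≤ x) :
    a.countP (fun x => decide (x ≤ (0 : Int))) = a.count 0 := by
  induction a with
  | nil => simp
  | cons x t ih =>
    have hx := hpos x (by simp)
    simp only [List.countP_cons, List.count_cons, ih (fun y hy => hpos y (by simp [hy]))]
    by_cases h : x = 0
    · simp [h]
    · have : ¬ (x ≤ (0:Int)) := by omega
      simp [h, this]

theorem pv_sum_count (a : List Int) (hpos : ∀ x ∈ a, 0 ≤ x) (v : Nat) :
    ∑ w ∈ Finset.range (v + 1), (a.count (w : Int) : Int)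
      = (a.countP (fun x => decide (x ≤ (v : Int))) : Int) := by
  induction v with
  | zero => simp [pv_countP_zero a hpos]
  | succ v ih =>
    rw [Finset.sum_range_succ, ih]
    have := pv_countP_succ a (v : Int)
    have e : ((v + 1 : Nat) : Int) = (v : Int) + 1 := by push_cast; ring
    rw [e, this]
    push_cast
    ring

def pvRank (a : List Int) (i : Nat) (v : Int) : Int :=
  (a.countP (fun x => decide (x < v)) : Int) + ((a.take i).count v : Int)

theorem pv_countP_le_split (a : List Int) (v : Int) :
    a.countP (fun x => decide (x ≤ v)) = a.countP (fun x => decide (x < v)) + a.count v := by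
  induction a with
  | nil => simp
  | cons x t ih =>
    simp only [List.countP_cons, List.count_cons, ih]
    by_cases h1 : x < v
    · have h2 : x ≤ v := by omega
      have h3 : ¬ (x = v) := by omega
      simp [h1, h2, h3]
      omega
    · by_cases h4 : x = v
      · have h2 : x ≤ v := by omega
        simp [h1, h2, h4]
        omega
      · have h5 : ¬ (x ≤ v) := by omega
        simp [h1, h4, h5]

theorem pv_place_loop (a : List Int) (k : Nat) (hk : k ≤ a.length)
    (perm cdf : List Int) (hp : perm.length = a.length)
    (hcl : ∀ x ∈ a, 0 ≤ x ∧ x.toNat < cdf.length)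
    (hc : ∀ v : Int, v ∈ a →
      PySem.List.pyGetD cdf v 0
        = (a.countP (fun x => decide (x ≤ v)) : Int) - ((a.drop k).count v : Int)) :
    ((((PySem.List.pyRange ((k : Int) - 1) (-1) (-1)).foldl
          (fun (s : List Int × List Int) i =>
            let val := PySem.List.pyGetD a i 0
            let idx := PySem.List.pyGetD s.2 val 0 - 1
            (PySem.List.pySetD s.1 i idx,
             PySem.List.pySetD s.2 val (PySem.List.pyGetD s.2 val 0 - 1)))
          (perm, cdf)).1).length = perm.length) ∧
    (∀ j : Nat, j < a.length →
      PySem.List.pyGetD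
        (((PySem.List.pyRange ((k : Int) - 1) (-1) (-1)).foldl
          (fun (s : List Int × List Int) i =>
            let val := PySem.List.pyGetD a i 0
            let idx := PySem.List.pyGetD s.2 val 0 - 1
            (PySem.List.pySetD s.1 i idx,
             PySem.List.pySetD s.2 val (PySem.List.pyGetD s.2 val 0 - 1)))
          (perm, cdf)).1) (j : Int) 0
      = if j < k then pvRank a j (a.getD j 0) else PySem.List.pyGetD perm (j : Int) 0) := by
  induction k generalizing perm cdf with
  | zero =>
    rw [show ((0 : Nat) : Int) - 1 = -1 by norm_num,
        PySem.List.pyRange_neg_one_eq_nil (by omega)]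
    exact ⟨rfl, fun j hj => by simp only [List.foldl_nil]; rw [if_neg (by omega)]⟩
  | succ k ih =>
    have hka : k < a.length := by omega
    have hrw : ((k + 1 : Nat) : Int) - 1 = (k : Int) := by push_cast; ring
    rw [hrw, PySem.List.pyRange_neg_one_cons (by omega), List.foldl_cons]
    -- the processed element
    have hval : PySem.List.pyGetD a ((k : Nat) : Int) 0 = a[k] := by
      rw [PySem.List.pyGetD_eq_getElem a 0 (by omega) (by exact_mod_cast hka)]
      simp
    set v : Int := a[k] with hv
    have hva : v ∈ a := List.getElem_mem hka
    obtain ⟨hv0, hvlt⟩ := hcl v hva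
    have hve : ((v.toNat : Nat) : Int) = v := Int.toNat_of_nonneg hv0
    have hdk : a.drop k = v :: a.drop (k + 1) := List.drop_eq_getElem_cons hka
    have hcdfv : PySem.List.pyGetD cdf v 0
        = (a.countP (fun x => decide (x ≤ v)) : Int) - ((a.drop (k+1)).count v : Int) :=
      hc v hva
    -- new state
    have happ : ∀ w : Int, w ∈ a →
        PySem.List.pyGetD (PySem.List.pySetD cdf v (PySem.List.pyGetD cdf v 0 - 1)) w 0
          = (a.countP (fun x => decide (x ≤ w)) : Int) - ((a.drop k).count w : Int) := by
      intro w hw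
      obtain ⟨hw0, hwlt⟩ := hcl w hw
      have hwe : ((w.toNat : Nat) : Int) = w := Int.toNat_of_nonneg hw0
      rw [← hve, ← hwe, PySem.List.pyGetD_pySetD_natCast cdf v.toNat w.toNat _ 0 hvlt]
      by_cases hwv : w.toNat = v.toNat
      · have hwv' : w = v := by omega
        rw [if_pos hwv, hve, hwe, hwv', hcdfv, hdk, List.count_cons_self]
        push_cast
        ring
      · have hwv' : v ≠ w := by omega
        rw [if_neg hwv, hwe, hc w hw, hdk]
        simp [List.count_cons, hwv']
    have hcl' : ∀ x ∈ a, 0 ≤ x ∧ x.toNat <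
        (PySem.List.pySetD cdf v (PySem.List.pyGetD cdf v 0 - 1)).length := by
      intro x hx
      rw [PySem.List.length_pySetD]
      exact hcl x hx
    have hp' : (PySem.List.pySetD perm ((k : Nat) : Int)
        (PySem.List.pyGetD cdf v 0 - 1)).length = a.length := by
      rw [PySem.List.length_pySetD]; exact hp
    obtain ⟨ihlen, ihg⟩ := ih (by omega) _ _ hp' hcl' happ
    refine ⟨?_, ?_⟩
    · simp only [hval] at ihlen ⊢
      rw [ihlen, PySem.List.length_pySetD]
    intro j hj
    have this := ihg j hj
    simp only [hval] at this ⊢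
    rw [this]
    by_cases hjk : j < k
    · rw [if_pos hjk, if_pos (by omega)]
    · by_cases hjk2 : j = k
      · -- j = k: the freshly written slot
        subst hjk2
        rw [if_neg (by omega), if_pos (by omega)]
        have hkp : j < perm.length := by omega
        rw [PySem.List.pyGetD_pySetD_natCast perm j j _ 0 hkp, if_pos rfl]
        -- value correctness
        have hsplit : (a.count v : Int)
            = ((a.take j).count v : Int) + 1 + ((a.drop (j+1)).count v : Int) := by
          conv_lhs => rw [show a = a.take j ++ a.drop j from (List.take_append_drop j a).symm]
          rw [hdk]
          simp [List.count_append, List.count_cons]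
          push_cast
          ring
        have hgd : a.getD j 0 = v := by
          rw [List.getD_eq_getElem a 0 hka]
        rw [hcdfv, pv_countP_le_split, hgd]
        unfold pvRank
        push_cast
        omega
      · rw [if_neg (by omega), if_neg (by omega)]
        have hkp : k < perm.length := by omega
        rw [PySem.List.pyGetD_pySetD_natCast perm k j _ 0 hkp, if_neg (by omega)]

theorem gen_sort_perm_eq (a : List Int) (hne : a ≠ []) (hpos : ∀ x ∈ a, 0 ≤ x) :
    gen_sort_perm a = gen_sort_perm_alt a := by
  obtain ⟨x, t, rfl⟩ := List.exists_cons_of_ne_nil hne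
  set a := x :: t with ha
  -- the maximum
  have hmax? : (PySem.List.max? a (fun y => y)) = some (t.foldl max x) :=
    PySem.List.max?_id_cons x t
  set m : Int := t.foldl max x with hm
  have hmd : (PySem.List.max? a (fun y => y)).getD 0 = m := by rw [hmax?]; rfl
  have hub : ∀ y ∈ a, y ≤ m := fun y hy => PySem.List.max?_isMax hmax? y hy
  have hmmem : m ∈ a := by
    rcases PySem.List.foldl_max_mem t x with h | h
    · rw [hm, h]; exact List.mem_cons_self
    · rw [hm]; exact List.mem_cons_of_mem x h
  have hm0 : 0 ≤ m := hpos m hmmem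
  -- unfold both ports
  simp only [gen_sort_perm, gen_cdf, gen_sort_perm_alt, hmd]
  set L : Nat := (m + 1).toNat with hLdef
  have hbound : ∀ y ∈ a, 0 ≤ y ∧ y.toNat < L := by
    intro y hy
    have := hub y hy
    have := hpos y hy
    omega
  -- the counting pass
  set out0 : List Int := List.replicate L (0 : Int) with hout0
  have hout0len : out0.length = L := by simp [hout0]
  have hbound0 : ∀ y ∈ a, 0 ≤ y ∧ y.toNat < out0.length := by rw [hout0len]; exact hbound
  obtain ⟨hc1len, hc1get⟩ := pv_count_loop a out0 hbound0
  set c1 : List Int := a.foldl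
    (fun out x => PySem.List.pySetD out x (PySem.List.pyGetD out x 0 + 1)) out0 with hc1
  rw [hout0len] at hc1len
  have hc1get' : ∀ j : Nat, j < L →
      PySem.List.pyGetD c1 (j : Int) 0 = (a.count (j : Int) : Int) := by
    intro j hj
    rw [hc1get j (by omega)]
    simp [hout0, List.getD_replicate 0 hj]
  -- the prefix pass
  obtain ⟨hcdflen, hcdfget, -⟩ := pv_prefix_loop c1 c1.length (le_refl _)
  set cdf0 : List Int := (PySem.List.pyRange 1 (c1.length : Int) 1).foldl
    (fun out i =>
      PySem.List.pySetD out i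
        (PySem.List.pyGetD out i 0 + PySem.List.pyGetD out (i - 1) 0)) c1 with hcdf0
  have hcdflen' : cdf0.length = L := by rw [hcdflen, hc1len]
  have hcdfP : ∀ j : Nat, j < L →
      PySem.List.pyGetD cdf0 (j : Int) 0
        = (a.countP (fun y => decide (y ≤ (j : Int))) : Int) := by
    intro j hj
    rw [hcdfget j (by omega)]
    rw [Finset.sum_congr rfl (fun w hw => by
      rw [hc1get' w (by simp at hw; omega)])]
    exact pv_sum_count a hpos j
  -- hypotheses of the placement pass
  have hclB : ∀ y ∈ a, 0 ≤ y ∧ y.toNat < cdf0.length := by rw [hcdflen']; exact hbound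
  have hc : ∀ v : Int, v ∈ a →
      PySem.List.pyGetD cdf0 v 0
        = (a.countP (fun y => decide (y ≤ v)) : Int) - ((a.drop a.length).count v : Int) := by
    intro v hv
    obtain ⟨hv0, hvlt⟩ := hbound v hv
    have hve : ((v.toNat : Nat) : Int) = v := Int.toNat_of_nonneg hv0
    rw [List.drop_length]
    simp only [List.count_nil]
    rw [← hve, hcdfP v.toNat hvlt]
    norm_num
  set perm0 : List Int := List.replicate a.length (0 : Int) with hperm0
  obtain ⟨hreslen, hresget⟩ := pv_place_loop a a.length (le_refl _) perm0 cdf0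
    (by simp [hperm0]) hclB hc
  set res : List Int := ((PySem.List.pyRange ((a.length : Int) - 1) (-1) (-1)).foldl
    (fun (s : List Int × List Int) i =>
      let val := PySem.List.pyGetD a i 0
      let idx := PySem.List.pyGetD s.2 val 0 - 1
      (PySem.List.pySetD s.1 i idx,
       PySem.List.pySetD s.2 val (PySem.List.pyGetD s.2 val 0 - 1)))
    (perm0, cdf0)).1 with hres
  have hreslen' : res.length = a.length := by rw [hreslen]; simp [hperm0]
  -- elementwise
  apply List.ext_getElem (by
    rw [hreslen']
    simp [PySem.List.length_enumerate])
  intro i hiA hiB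
  have hia : i < a.length := by rw [hreslen'] at hiA; exact hiA
  have eA : res[i] = pvRank a i (a.getD i 0) := by
    have h1 := hresget i hia
    rw [if_pos hia] at h1
    rw [PySem.List.pyGetD_eq_getElem _ 0 (by omega) (by exact_mod_cast hiA)] at h1
    simpa using h1
  rw [eA]
  -- B side
  have hiE : i < (PySem.List.enumerate a 0).length := by
    rw [PySem.List.length_enumerate]; exact hia
  rw [List.getElem_map, PySem.List.getElem_enumerate a 0 i hiE]
  simp only [zero_add]
  rw [PySem.List.slice_to_natCast a i]
  have hcnt : (List.take i a).countP (fun y => decide (y = a[i]'hia))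
      = (List.take i a).count (a[i]'hia) := Eq.symm List.count_eq_countP
  rw [hcnt]
  unfold pvRank
  rw [List.getD_eq_getElem a 0 hia]


-- ===== VERDICT (by name: the statement is the Claim_ definition above) =====
theorem gen_sort_perm_spec : Claim_equal_gen_sort_perm := by
  intro a _ hpre
  exact gen_sort_perm_eq a hpre.1 hpre.2
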